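-- pv_equiv track=rewrite | github.com/Husseinmdarman/BookContentToYoutubeVideos | datacleaner.py | strip_preface_introduction
-- ===== SOURCE A (Python) =====
-- def strip_preface_introduction(data):
--     """
--     Strip preface and introduction from table of content
--     """
--
--     counter = 0
--     for x in data:
--         counter = counter + 1
--         if(x == 'Preface'):
--             position_in_list = counter
--         elif(x == 'Introduction'):
--             position_in_list = counter
--
--
--     data_without_preface = data[position_in_list+1::]
--
--     return data_without_preface
-- ===== SOURCE B (Python) =====
-- def strip_preface_introduction(data):
--     """
--     Strip preface and introduction from table of content
--     """
--     # scan backwards; the first hit from the back is the last marker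
--     for i in range(len(data) - 1, -1, -1):
--         if data[i] in ('Preface', 'Introduction'):
--             return data[i + 2:]
--     raise ValueError("no 'Preface' or 'Introduction' entry found")
-- ===== Notes on version B (the rewrite author's own statement) =====
-- stated objective: idiomatic
-- what changed: Replaces A's full forward pass that keeps overwriting the last marker position with a backward scan that early-returns at the first marker seen from the end and slices directly.
import Mathlib
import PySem

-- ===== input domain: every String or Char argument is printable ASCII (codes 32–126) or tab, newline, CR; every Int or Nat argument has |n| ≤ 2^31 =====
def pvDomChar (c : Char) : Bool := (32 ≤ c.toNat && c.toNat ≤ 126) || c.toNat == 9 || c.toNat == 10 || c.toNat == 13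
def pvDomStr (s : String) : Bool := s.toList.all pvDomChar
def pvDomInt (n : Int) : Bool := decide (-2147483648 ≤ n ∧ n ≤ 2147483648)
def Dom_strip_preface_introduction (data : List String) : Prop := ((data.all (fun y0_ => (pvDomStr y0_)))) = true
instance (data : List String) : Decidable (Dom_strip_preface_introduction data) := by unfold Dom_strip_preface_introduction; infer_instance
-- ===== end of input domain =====

-- B replaces A's full forward pass (overwriting the last marker position) with a backward scan
-- that returns at the first marker seen from the end; objective: idiomatic.


-- ===== PORT A =====
def strip_preface_introduction (data : List String) : List String :=
  let st := data.foldl (fun (s : Int × Option Int) x =>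
    let counter := s.1 + 1
    if x = "Preface" then (counter, some counter)
    else if x = "Introduction" then (counter, some counter)
    else (counter, s.2)) ((0 : Int), (none : Option Int))
  match st.2 with
  | some position_in_list => PySem.List.slice data (some (position_in_list + 1)) none
  | none => []  -- Python raises UnboundLocalError here; excluded by Pre_

-- ===== PORT B =====
-- the for-loop over range(len(data)-1, -1, -1) with an early return
def altLoop (data : List String) : List Int → List String
  | [] => []  -- Python raises ValueError here; excluded by Pre_
  | i :: rest =>
      match PySem.List.pyGet? data i with
      | some x =>
          if x = "Preface" ∨ x = "Introduction" then PySem.List.slice data (some (i + 2)) none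
          else altLoop data rest
      | none => altLoop data rest

def strip_preface_introduction_alt (data : List String) : List String :=
  altLoop data (PySem.List.pyRange ((data.length : Int) - 1) (-1) (-1))

-- ===== PRECONDITION & SPEC =====
-- Pre_ excludes exactly the inputs with no 'Preface'/'Introduction' entry, on which
-- A raises UnboundLocalError (and B raises ValueError).
def Pre_strip_preface_introduction (data : List String) : Prop :=
  "Preface" ∈ data ∨ "Introduction" ∈ data
instance (data : List String) : Decidable (Pre_strip_preface_introduction data) := by
  unfold Pre_strip_preface_introduction; infer_instance

def pvWitness_strip_preface_introduction : List String := ["a", "Preface", "b", "c"]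

def Spec_strip_preface_introduction (data : List String) (out : List String) : Prop := out = strip_preface_introduction_alt data
instance (data : List String) (out : List String) : Decidable (Spec_strip_preface_introduction data out) := by unfold Spec_strip_preface_introduction; infer_instance

-- ===== CLAIM (what is proved, stated in full; the proofs are below) =====
def Claim_equal_strip_preface_introduction : Prop := ∀ (data : List String), Dom_strip_preface_introduction data → Pre_strip_preface_introduction data → Spec_strip_preface_introduction data (strip_preface_introduction data)

-- ===== LEMMAS AND PROOFS =====

-- index of the LAST 'Preface'/'Introduction' in the list, if any
def lm : List String → Option Nat
  | [] => none
  | x :: xs =>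
      match lm xs with
      | some j => some (j + 1)
      | none => if x = "Preface" ∨ x = "Introduction" then some 0 else none

lemma A_fold (data : List String) : ∀ (c : Int) (acc : Option Int),
    (data.foldl (fun (s : Int × Option Int) x =>
      let counter := s.1 + 1
      if x = "Preface" then (counter, some counter)
      else if x = "Introduction" then (counter, some counter)
      else (counter, s.2)) (c, acc)).2
    = match lm data with
      | some j => some (c + (j : Int) + 1)
      | none => acc := by
  induction data with
  | nil => intro c acc; simp [lm]
  | cons x xs ih =>
      intro c acc
      simp only [List.foldl_cons, lm]
      by_cases hp : x = "Preface"
      · simp only [hp, ih]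
        cases h : lm xs with
        | some j => simp only []; congr 1; push_cast; ring
        | none => simp
      · by_cases hi : x = "Introduction"
        · simp only [hi, if_neg hp, ih]
          cases h : lm xs with
          | some j => simp only []; congr 1; push_cast; ring
          | none => simp
        · simp only [if_neg hp, if_neg hi, ih]
          cases h : lm xs with
          | some j => simp only []; congr 1; push_cast; ring
          | none => simp [hp, hi]

lemma lm_take_succ (data : List String) : ∀ (k : Nat), k < data.length →
    lm (data.take (k + 1))
      = if data[k]?.getD "" = "Preface" ∨ data[k]?.getD "" = "Introduction" then some k
        else lm (data.take k) := by
  induction data with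
  | nil => intro k hk; simp at hk
  | cons x xs ih =>
      intro k hk
      cases k with
      | zero => simp [lm]
      | succ k =>
          have hk' : k < xs.length := by simpa using hk
          simp only [List.take_succ_cons, lm, ih k hk', List.getElem?_cons_succ]
          by_cases hm : xs[k]?.getD "" = "Preface" ∨ xs[k]?.getD "" = "Introduction"
          · simp [hm]
          · simp only [if_neg hm]

lemma B_loop (data : List String) : ∀ (k : Nat), k ≤ data.length →
    altLoop data (PySem.List.pyRange ((k : Int) - 1) (-1) (-1))
      = match lm (data.take k) with
        | some j => PySem.List.slice data (some ((j : Int) + 2)) none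
        | none => [] := by
  intro k
  induction k with
  | zero =>
      intro _
      rw [PySem.List.pyRange_neg_one_eq_nil (by norm_num)]
      simp [altLoop, lm]
  | succ k ih =>
      intro hk
      have hk' : k < data.length := by omega
      have hcons : PySem.List.pyRange ((k + 1 : Nat) - 1) (-1) (-1)
          = (k : Int) :: PySem.List.pyRange ((k : Int) - 1) (-1) (-1) := by
        push_cast
        rw [show ((k : Int) + 1 - 1) = (k : Int) by ring]
        exact PySem.List.pyRange_neg_one_cons (by omega)
      rw [hcons]
      have hget : PySem.List.pyGet? data (k : Int) = some (data[k]?.getD "") := by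
        simp [PySem.List.pyGet?, PySem.List.pyIdx?, hk']
      simp only [altLoop, hget]
      rw [lm_take_succ data k hk']
      by_cases hm : data[k]?.getD "" = "Preface" ∨ data[k]?.getD "" = "Introduction"
      · simp [hm]
      · simp only [if_neg hm, ih (by omega)]

lemma lm_isSome (data : List String) (h : "Preface" ∈ data ∨ "Introduction" ∈ data) :
    ∃ j, lm data = some j := by
  induction data with
  | nil => simp at h
  | cons x xs ih =>
      cases hx : lm xs with
      | some j => exact ⟨j + 1, by simp [lm, hx]⟩
      | none =>
          have hm : x = "Preface" ∨ x = "Introduction" := by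
            by_contra hc
            rw [not_or] at hc
            have hmem : "Preface" ∈ xs ∨ "Introduction" ∈ xs := by
              rcases h with h | h
              · rcases List.mem_cons.mp h with h1 | h1
                · exact absurd h1.symm hc.1
                · exact Or.inl h1
              · rcases List.mem_cons.mp h with h1 | h1
                · exact absurd h1.symm hc.2
                · exact Or.inr h1
            obtain ⟨j, hj⟩ := ih hmem
            rw [hx] at hj; cases hj
          exact ⟨0, by simp [lm, hx, hm]⟩

-- ===== VERDICT (by name: the statement is the Claim_ definition above) =====
theorem strip_preface_introduction_spec : Claim_equal_strip_preface_introduction := by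
  intro data _ hpre
  unfold Spec_strip_preface_introduction strip_preface_introduction strip_preface_introduction_alt
  obtain ⟨j, hj⟩ := lm_isSome data hpre
  have hb := B_loop data data.length (le_refl _)
  rw [List.take_length] at hb
  simp only [A_fold data 0 none, hb, hj]
  congr 2
  ring
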